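-- pv_equiv track=rewrite | github.com/heffer-docker/tibber-prices | tibber_prices.py | find_minimal_sum_hours
-- ===== SOURCE A (Python) =====
-- def find_minimal_sum_hours(prices, count):
--     min_sum = float('inf')
--     min_sum_indices = []
--     min_start = 0
--
--     for i in range(len(prices) - (count - 1)):
--         current_sum = sum(prices[i:i + count])
--         if current_sum < min_sum:
--             min_sum = current_sum
--             min_start = i
--
--     for c in range(count):
--         min_sum_indices.append(min_start + c)
--
--     return min_sum_indices
-- ===== SOURCE B (Python) =====
-- def find_minimal_sum_hours(prices, count):
--     n = len(prices)
--     best = 0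
--     if 0 < count <= n:
--         s = sum(prices[:count])
--         best_sum = s
--         for i in range(1, n - count + 1):
--             s += prices[i + count - 1] - prices[i - 1]
--             if s < best_sum:
--                 best_sum = s
--                 best = i
--     return list(range(best, best + count))
-- ===== Notes on version B (the rewrite author's own statement) =====
-- stated objective: faster
-- what changed: B replaces A's re-summation of every length-count slice (sum(prices[i:i+count]) per position) by a single sliding-window pass that updates one running sum incrementally, guarded so the degenerate cases (count <= 0, count > len) fall out of the same code.
import Mathlib
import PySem

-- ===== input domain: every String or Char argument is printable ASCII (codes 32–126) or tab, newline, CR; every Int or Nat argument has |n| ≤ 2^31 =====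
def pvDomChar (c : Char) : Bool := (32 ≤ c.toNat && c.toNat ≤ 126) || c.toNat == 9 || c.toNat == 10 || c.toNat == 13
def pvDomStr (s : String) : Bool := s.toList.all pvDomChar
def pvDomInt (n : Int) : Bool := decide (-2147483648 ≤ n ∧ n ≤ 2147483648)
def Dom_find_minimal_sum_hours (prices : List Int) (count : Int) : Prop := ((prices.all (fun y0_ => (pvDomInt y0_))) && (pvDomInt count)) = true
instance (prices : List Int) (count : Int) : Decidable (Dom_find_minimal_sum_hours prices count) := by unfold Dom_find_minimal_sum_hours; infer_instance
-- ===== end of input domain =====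

-- B replaces A's per-window re-summation by a single pass with an incremental sliding running sum.

-- ===== PORT A =====
-- min_sum = float('inf') is modelled as Option Int: none = inf (any int compares below it).
def find_minimal_sum_hours (prices : List Int) (count : Int) : List Int :=
  let st := (PySem.List.pyRange 0 ((prices.length : Int) - (count - 1)) 1).foldl
    (fun (st : Option Int × Int) i =>
      let current_sum := (PySem.List.slice prices (some i) (some (i + count))).sum
      match st.1 with
      | none => (some current_sum, i)
      | some m => if current_sum < m then (some current_sum, i) else st)
    (none, 0)
  (PySem.List.pyRange 0 count 1).foldl (fun acc c => acc ++ [st.2 + c]) []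

-- ===== PORT B =====
def find_minimal_sum_hours_alt (prices : List Int) (count : Int) : List Int :=
  let n : Int := prices.length
  let best :=
    if 0 < count ∧ count ≤ n then
      let s0 := (PySem.List.slice prices none (some count)).sum
      let st := (PySem.List.pyRange 1 (n - count + 1) 1).foldl
        (fun (st : Int × Int × Int) i =>
          let s := st.1 + PySem.List.pyGetD prices (i + count - 1) 0
                        - PySem.List.pyGetD prices (i - 1) 0
          if s < st.2.1 then (s, s, i) else (s, st.2.1, st.2.2))
        (s0, s0, 0)
      st.2.2
    else 0
  PySem.List.pyRange best (best + count) 1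

-- ===== PRECONDITION & SPEC =====
def Spec_find_minimal_sum_hours (prices : List Int) (count : Int) (out : List Int) : Prop := out = find_minimal_sum_hours_alt prices count
instance (prices : List Int) (count : Int) (out : List Int) : Decidable (Spec_find_minimal_sum_hours prices count out) := by unfold Spec_find_minimal_sum_hours; infer_instance

-- ===== CLAIM (what is proved, stated in full; the proofs are below) =====
def Claim_equal_find_minimal_sum_hours : Prop := ∀ (prices : List Int) (count : Int), Dom_find_minimal_sum_hours prices count → Spec_find_minimal_sum_hours prices count (find_minimal_sum_hours prices count)

-- ===== LEMMAS AND PROOFS =====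

-- window sum: w i = sum(prices[i:i+count])
def pvW (prices : List Int) (count : Int) (i : Int) : Int :=
  (PySem.List.slice prices (some i) (some (i + count))).sum

-- the first-argmin fold that both loops reduce to
def pvArg (w : Int → Int) (l : List Int) (st : Int × Int) : Int × Int :=
  l.foldl (fun st i => if w i < st.1 then (w i, i) else st) st

lemma pvArg_cons (w : Int → Int) (x : Int) (l : List Int) (st : Int × Int) :
    pvArg w (x :: l) st = pvArg w l (if w x < st.1 then (w x, x) else st) := by
  unfold pvArg
  rw [List.foldl_cons]

-- A's loop, once min_sum has become some m, is the generic first-argmin fold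
lemma A_fold (prices : List Int) (count : Int) (l : List Int) (m j : Int) :
    l.foldl
      (fun (st : Option Int × Int) i =>
        let current_sum := (PySem.List.slice prices (some i) (some (i + count))).sum
        match st.1 with
        | none => (some current_sum, i)
        | some m => if current_sum < m then (some current_sum, i) else st)
      (some m, j)
    = (some (pvArg (pvW prices count) l (m, j)).1, (pvArg (pvW prices count) l (m, j)).2) := by
  induction l generalizing m j with
  | nil => rfl
  | cons x xs ih =>
      rw [List.foldl_cons, pvArg_cons]
      simp only [pvW]
      by_cases h : (PySem.List.slice prices (some x) (some (x + count))).sum < m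
      · rw [if_pos h, if_pos h]
        exact ih ((PySem.List.slice prices (some x) (some (x + count))).sum) x
      · rw [if_neg h, if_neg h]
        exact ih m j

-- B's loop: the running sum stays equal to the current window sum, and its
-- (best_sum, best) components perform the generic first-argmin fold
lemma B_fold (prices : List Int) (count : Int) :
    ∀ (N : Nat) (a b : Int), (b - a).toNat = N → a ≤ b →
    (∀ i, a ≤ i → i < b →
        pvW prices count (i - 1) + PySem.List.pyGetD prices (i + count - 1) 0
          - PySem.List.pyGetD prices (i - 1) 0 = pvW prices count i) →
    ∀ (m j : Int),
    (PySem.List.pyRange a b 1).foldl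
      (fun (st : Int × Int × Int) i =>
        let s := st.1 + PySem.List.pyGetD prices (i + count - 1) 0
                      - PySem.List.pyGetD prices (i - 1) 0
        if s < st.2.1 then (s, s, i) else (s, st.2.1, st.2.2))
      (pvW prices count (a - 1), m, j)
    = (pvW prices count (b - 1),
       pvArg (pvW prices count) (PySem.List.pyRange a b 1) (m, j)) := by
  intro N
  induction N with
  | zero =>
      intro a b hN hab _ m j
      have hnil : PySem.List.pyRange a b 1 = [] := PySem.List.pyRange_one_eq_nil (by omega)
      have hba : b - 1 = a - 1 := by omega
      rw [hnil, hba]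
      rfl
  | succ N ih =>
      intro a b hN hab hrec m j
      have hlt : a < b := by omega
      rw [PySem.List.pyRange_one_cons hlt, List.foldl_cons, pvArg_cons]
      have hs : pvW prices count (a - 1) + PySem.List.pyGetD prices (a + count - 1) 0
          - PySem.List.pyGetD prices (a - 1) 0 = pvW prices count a :=
        hrec a (le_refl a) hlt
      have h3 : ∀ i, a + 1 ≤ i → i < b →
          pvW prices count (i - 1) + PySem.List.pyGetD prices (i + count - 1) 0
            - PySem.List.pyGetD prices (i - 1) 0 = pvW prices count i :=
        fun i hi1 hi2 => hrec i (by omega) hi2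
      have ha1 : a + 1 - 1 = a := by omega
      dsimp only
      rw [hs]
      by_cases h : pvW prices count a < m
      · rw [if_pos h, if_pos h]
        have := ih (a+1) b (by omega) (by omega) h3 (pvW prices count a) a
        rw [ha1] at this
        exact this
      · rw [if_neg h, if_neg h]
        have := ih (a+1) b (by omega) (by omega) h3 m j
        rw [ha1] at this
        exact this

-- sum over take/drop: removing the left element and adding the next right one shifts the window
lemma sum_rec (l : List Int) (t k : Nat) (hk : 1 ≤ k) (hib : t + 1 + k ≤ l.length) :
    ((l.drop t).take k).sum + l.getD (t+k) 0 - l.getD t 0 = ((l.drop (t+1)).take k).sum := by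
  have ht : t < l.length := by omega
  have htk : t + k < l.length := by omega
  obtain ⟨k', rfl⟩ : ∃ k', k = k' + 1 := ⟨k - 1, by omega⟩
  have hdrop : l.drop t = l[t] :: l.drop (t+1) := List.drop_eq_getElem_cons ht
  have htake : (l.drop (t+1)).take (k'+1) = (l.drop (t+1)).take k' ++ [l[t+(k'+1)]] := by
    rw [List.take_add_one]
    congr 1
    rw [List.getElem?_drop]
    have : t + 1 + k' = t + (k'+1) := by omega
    rw [this, List.getElem?_eq_getElem htk]
    rfl
  rw [List.getD_eq_getElem?_getD, List.getD_eq_getElem?_getD,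
      List.getElem?_eq_getElem ht, List.getElem?_eq_getElem htk,
      hdrop, List.take_succ_cons, htake]
  simp only [List.sum_cons, List.sum_append, Option.getD_some, List.sum_nil]
  ring

-- the sliding-window recurrence, in the Int form B's loop uses
lemma window_rec (prices : List Int) (count : Int) (hc : 1 ≤ count)
    (i : Int) (hi : 1 ≤ i) (hib : i + count ≤ (prices.length : Int)) :
    pvW prices count (i - 1) + PySem.List.pyGetD prices (i + count - 1) 0
      - PySem.List.pyGetD prices (i - 1) 0 = pvW prices count i := by
  obtain ⟨t, ht⟩ : ∃ t : Nat, i = (t:Int) + 1 := ⟨(i-1).toNat, by omega⟩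
  obtain ⟨k, hkk⟩ : ∃ k : Nat, count = (k:Int) := ⟨count.toNat, by omega⟩
  subst ht hkk
  have hk1 : 1 ≤ k := by omega
  have hlen : t + 1 + k ≤ prices.length := by omega
  unfold pvW
  rw [show ((t:Int)+1-1 : Int) = ((t:Nat):Int) from by omega,
      show ((t:Int)+1+(k:Int)-1 : Int) = (((t+k:Nat)):Int) from by push_cast; ring,
      show ((t:Int)+1 : Int) = (((t+1:Nat)):Int) from by push_cast; ring,
      PySem.List.slice_natCast_add, PySem.List.slice_natCast_add,
      PySem.List.pyGetD_natCast, PySem.List.pyGetD_natCast]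
  exact sum_rec prices t k hk1 hlen

-- appending s + c over range(count) builds range(s, s + count)
lemma shift_range (s c : Int) :
    (PySem.List.pyRange 0 c 1).foldl (fun acc x => acc ++ [s + x]) []
      = PySem.List.pyRange s (s + c) 1 := by
  rw [PySem.List.foldl_append_singleton_eq_map]
  simp [PySem.List.pyRange_one, List.map_map, Function.comp]

-- ===== VERDICT (by name: the statement is the Claim_ definition above) =====
theorem find_minimal_sum_hours_spec : Claim_equal_find_minimal_sum_hours := by
  intro prices count _
  unfold Spec_find_minimal_sum_hours find_minimal_sum_hours find_minimal_sum_hours_alt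
  dsimp only
  rw [shift_range]
  set n : Int := (prices.length : Int) with hn
  by_cases hc0 : 0 < count ∧ count ≤ n
  · rw [if_pos hc0]
    obtain ⟨hc1, hcn⟩ := hc0
    -- B's initial sum is the first window sum
    have hs0 : (PySem.List.slice prices none (some count)).sum = pvW prices count 0 := by
      unfold pvW
      rw [PySem.List.slice_zero_start, zero_add]
    -- A's loop range is 0 :: [1, n-count+1)
    have hA : PySem.List.pyRange 0 (n - (count - 1)) 1
        = 0 :: PySem.List.pyRange 1 (n - count + 1) 1 := by
      rw [show n - (count - 1) = n - count + 1 from by ring]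
      exact PySem.List.pyRange_one_cons (by omega)
    rw [hA, List.foldl_cons]
    dsimp only
    rw [show (0 : Int) + count = count from zero_add count]
    rw [show (PySem.List.slice prices (some 0) (some count)).sum = pvW prices count 0 from by
          unfold pvW; rw [zero_add]]
    rw [A_fold, hs0]
    have hB := B_fold prices count (n - count + 1 - 1).toNat 1 (n - count + 1) rfl (by omega)
      (fun i hi1 hi2 => window_rec prices count (by omega) i hi1 (by omega))
      (pvW prices count 0) 0
    rw [show (1 : Int) - 1 = 0 from by ring] at hB
    rw [hB]
  · rw [if_neg hc0]
    by_cases hc1 : count ≤ 0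
    · -- both outputs are empty ranges
      generalize (List.foldl _ ((none : Option Int), (0:Int)) (PySem.List.pyRange 0 (n - (count - 1)) 1)).2 = s
      rw [PySem.List.pyRange_one_eq_nil (by omega : s + count ≤ s),
          PySem.List.pyRange_one_eq_nil (by omega : (0:Int) + count ≤ 0)]
    · -- 1 ≤ count and n < count: A's loop range is empty, min_start = 0
      have hA : PySem.List.pyRange 0 (n - (count - 1)) 1 = [] :=
        PySem.List.pyRange_one_eq_nil (by omega)
      rw [hA]
      rfl
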